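-- pv_equiv track=rewrite | github.com/dewinmil/discretePython | coloring.py | is_proper_edge
-- ===== SOURCE A (Python) =====
-- def is_proper_edge(graph):
--   buff = []
--   for n in graph:
--     buff = []
--     for x in graph[n]:
--       for c in x:
--         if type(c) is int:
--           if c not in buff:
--             buff.append(c)
--           else:
--             return False
--
--   return True
-- ===== SOURCE B (Python) =====
-- def is_proper_edge(graph):
--   for adj in graph.values():
--     colors = sorted(c for x in adj for c in x if type(c) is int)
--     if any(a == b for a, b in zip(colors, colors[1:])):
--       return False
--   return True
-- ===== Notes on version B (the rewrite author's own statement) =====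
-- stated objective: alternative
-- what changed: B replaces A's incremental seen-buffer with early exit inside the innermost loop by a per-node sort-then-adjacent-scan: flatten each node's integer colors, sort them, and report a duplicate iff two adjacent sorted entries are equal.
import Mathlib
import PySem

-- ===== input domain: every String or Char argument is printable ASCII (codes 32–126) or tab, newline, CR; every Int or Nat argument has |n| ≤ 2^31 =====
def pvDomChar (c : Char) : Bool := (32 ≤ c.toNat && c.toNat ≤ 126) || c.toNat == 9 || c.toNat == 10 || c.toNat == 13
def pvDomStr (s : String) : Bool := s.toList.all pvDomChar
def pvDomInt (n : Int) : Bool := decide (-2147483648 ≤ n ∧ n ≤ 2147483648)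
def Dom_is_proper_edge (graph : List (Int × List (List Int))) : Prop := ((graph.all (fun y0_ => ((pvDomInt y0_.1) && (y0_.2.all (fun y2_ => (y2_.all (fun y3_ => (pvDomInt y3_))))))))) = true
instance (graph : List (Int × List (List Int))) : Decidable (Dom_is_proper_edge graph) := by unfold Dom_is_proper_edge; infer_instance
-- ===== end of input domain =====

-- B is a per-node sort-then-adjacent-scan (flatten, sort, test neighbouring equal entries)
-- instead of A's seen-buffer with early exit inside the innermost loop; objective: alternative.

-- ===== PORT A =====
-- inner loop 'for c in x': type(c) is int always holds (c : Int); 'c not in buff' appends, else return False (none)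
def pvA_inner : List Int → List Int → Option (List Int)
  | buff, [] => some buff
  | buff, c :: cs => if c ∉ buff then pvA_inner (buff ++ [c]) cs else none

-- middle loop 'for x in graph[n]'
def pvA_node : List Int → List (List Int) → Option (List Int)
  | buff, [] => some buff
  | buff, x :: xs =>
    match pvA_inner buff x with
    | none => none
    | some b => pvA_node b xs

-- outer loop 'for n in graph' with the dict lookup graph[n]; 'buff = []' resets per node
def pvA_go (graph : List (Int × List (List Int))) : List (Int × List (List Int)) → Bool
  | [] => true
  | p :: rest =>
    match pvA_node [] ((PySem.Dict.mk graph).getD p.1 []) with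
    | none => false
    | some _ => pvA_go graph rest

def is_proper_edge (graph : List (Int × List (List Int))) : Bool := pvA_go graph graph

-- ===== PORT B =====
-- any(a == b for a, b in zip(colors, colors[1:])) — adjacent equal pair in the sorted list
def pvB_hasAdjDup : List Int → Bool
  | a :: b :: rest => a == b || pvB_hasAdjDup (b :: rest)
  | _ => false

-- colors = sorted(c for x in adj for c in x if type(c) is int)  (the filter keeps every c : Int)
def pvB_colors (adj : List (List Int)) : List Int :=
  PySem.List.sorted (adj.flatMap (fun x => x)) (fun c => c) false

def is_proper_edge_alt (graph : List (Int × List (List Int))) : Bool :=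
  graph.all (fun p => !pvB_hasAdjDup (pvB_colors p.2))

-- ===== PRECONDITION & SPEC =====
-- Pre_ excludes association lists with duplicate node keys: Python's graph is a dict, which
-- cannot carry duplicate keys (they collapse at construction), so no Python input is excluded.
def Pre_is_proper_edge (graph : List (Int × List (List Int))) : Prop := (graph.map Prod.fst).Nodup
instance (graph : List (Int × List (List Int))) : Decidable (Pre_is_proper_edge graph) := by unfold Pre_is_proper_edge; infer_instance

def pvWitness_is_proper_edge : (List (Int × List (List Int))) := [(0, [[1, 2], [3]]), (1, [[4]])]

def Spec_is_proper_edge (graph : List (Int × List (List Int))) (out : Bool) : Prop := out = is_proper_edge_alt graph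
instance (graph : List (Int × List (List Int))) (out : Bool) : Decidable (Spec_is_proper_edge graph out) := by unfold Spec_is_proper_edge; infer_instance

-- ===== CLAIM (what is proved, stated in full; the proofs are below) =====
def Claim_equal_is_proper_edge : Prop := ∀ (graph : List (Int × List (List Int))), Dom_is_proper_edge graph → Pre_is_proper_edge graph → Spec_is_proper_edge graph (is_proper_edge graph)

-- ===== LEMMAS AND PROOFS =====

theorem pvA_inner_eq (x : List Int) : ∀ buff : List Int, buff.Nodup →
    pvA_inner buff x = if (buff ++ x).Nodup then some (buff ++ x) else none := by
  induction x with
  | nil => intro buff hb; simp [pvA_inner, hb]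
  | cons c cs ih =>
    intro buff hb
    simp only [pvA_inner]
    by_cases hc : c ∈ buff
    · have hnd : ¬ (buff ++ c :: cs).Nodup := by
        simp only [List.nodup_append, List.nodup_cons]
        rintro ⟨-, -, hdis⟩
        exact hdis c hc c (List.mem_cons_self ..) rfl
      simp [hc, hnd]
    · have hb' : (buff ++ [c]).Nodup := by
        refine List.Nodup.append hb (List.nodup_singleton c) ?_
        intro a ha hbm
        rw [List.mem_singleton] at hbm
        subst hbm
        exact hc ha
      rw [if_pos hc, ih (buff ++ [c]) hb']
      simp only [List.append_assoc, List.singleton_append]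

theorem pvA_node_eq (xs : List (List Int)) : ∀ buff : List Int, buff.Nodup →
    pvA_node buff xs = if (buff ++ xs.flatten).Nodup then some (buff ++ xs.flatten) else none := by
  induction xs with
  | nil => intro buff hb; simp [pvA_node, hb]
  | cons x xs ih =>
    intro buff hb
    simp only [pvA_node, List.flatten_cons]
    rw [pvA_inner_eq x buff hb]
    by_cases h : (buff ++ x).Nodup
    · rw [if_pos h]
      show pvA_node (buff ++ x) xs = _
      rw [ih (buff ++ x) h]
      simp only [List.append_assoc]
    · have hnd : ¬ (buff ++ (x ++ xs.flatten)).Nodup := by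
        intro hh
        exact h (List.Nodup.sublist (by simp) hh)
      rw [if_neg h, if_neg hnd]

-- in a ≤-ordered list, an adjacent duplicate exists iff the list has any duplicate
theorem hasAdjDup_of_pairwise (s : List Int) (hs : s.Pairwise (· ≤ ·)) :
    pvB_hasAdjDup s = !decide s.Nodup := by
  induction s with
  | nil => simp [pvB_hasAdjDup]
  | cons a t ih =>
    match t, hs with
    | [], _ => simp [pvB_hasAdjDup]
    | b :: r, hs =>
      have hab : a ≤ b := (List.pairwise_cons.mp hs).1 b (List.mem_cons_self ..)
      have hr : (b :: r).Pairwise (· ≤ ·) := (List.pairwise_cons.mp hs).2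
      by_cases he : a = b
      · subst he
        have : ¬ (a :: a :: r).Nodup := by simp
        simp [pvB_hasAdjDup, this]
      · have hlt : a < b := lt_of_le_of_ne hab he
        have hna : a ∉ b :: r := by
          intro hmem
          rcases List.mem_cons.mp hmem with h | h
          · exact he h
          · have : b ≤ a := (List.pairwise_cons.mp hr).1 a h
            exact absurd hlt (not_lt.mpr this)
        have hbe : (a == b) = false := by simp [he]
        have : (a :: b :: r).Nodup ↔ (b :: r).Nodup := by
          simp [List.nodup_cons, hna]
        simp only [pvB_hasAdjDup, hbe, Bool.false_or, ih hr, this]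

theorem hasAdjDup_colors (adj : List (List Int)) :
    pvB_hasAdjDup (pvB_colors adj) = !decide adj.flatten.Nodup := by
  have h2 : (PySem.List.sorted (adj.flatMap (fun x => x)) (fun c => c) false).Nodup ↔
      adj.flatten.Nodup :=
    (PySem.List.sorted_perm _ _ _).nodup_iff.trans (by simp [List.flatMap_id'])
  unfold pvB_colors
  rw [hasAdjDup_of_pairwise _ (PySem.List.sorted_pairwise (adj.flatMap (fun x => x)) (fun c => c))]
  simp only [List.flatMap_id'] at h2
  simp [h2]

theorem pvA_go_eq (graph : List (Int × List (List Int)))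
    (hk : (graph.map Prod.fst).Nodup) :
    ∀ pending : List (Int × List (List Int)), (∀ p ∈ pending, p ∈ graph) →
      pvA_go graph pending = pending.all (fun p => decide p.2.flatten.Nodup) := by
  intro pending
  induction pending with
  | nil => intro _; rfl
  | cons p rest ih =>
    intro hmem
    have hget : (PySem.Dict.mk graph).getD p.1 [] = p.2 :=
      PySem.Dict.getD_of_mem_items (PySem.Dict.mk graph)
        (by simpa using hmem p (by simp)) (by simpa [PySem.Dict.keys] using hk) []
    simp only [pvA_go, hget, pvA_node_eq p.2 [] (by simp), List.nil_append, List.all_cons]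
    by_cases h : p.2.flatten.Nodup
    · rw [if_pos h]
      simp only [h, decide_true, Bool.true_and]
      exact ih (fun q hq => hmem q (by simp [hq]))
    · rw [if_neg h]
      simp [h]

-- ===== VERDICT (by name: the statement is the Claim_ definition above) =====
theorem is_proper_edge_spec : Claim_equal_is_proper_edge := by
  intro graph _ hpre
  unfold Spec_is_proper_edge is_proper_edge is_proper_edge_alt
  rw [pvA_go_eq graph hpre graph (fun p hp => hp)]
  simp [hasAdjDup_colors]
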